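-- pv_equiv track=rewrite | github.com/ak2810/Story-Video-Generator | metadata_generator.py | _cap_tt_hashtags
-- ===== SOURCE A (Python) =====
-- TT_HASHTAG_MAX    = 150
--
-- def _cap_tt_hashtags(raw_list):
--     """Limit hashtags to fit within 150 chars total."""
--     cleaned = []
--     for h in raw_list:
--         h = str(h).strip().strip('"').strip("'")
--         if not h.startswith("#"):
--             h = "#" + h
--         h = h.replace(" ", "")  # TikTok hashtags can't have spaces
--         if len(h) > 2:
--             cleaned.append(h)
--
--     # Join and limit to 150 chars
--     joined = " ".join(cleaned)
--     if len(joined) <= TT_HASHTAG_MAX: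
--         return cleaned
--
--     # Trim from the end
--     result = []
--     current_len = 0
--     for h in cleaned:
--         cost = len(h) + (1 if result else 0)  # +1 for space
--         if current_len + cost > TT_HASHTAG_MAX:
--             break
--         result.append(h)
--         current_len += cost
--     return result
-- ===== SOURCE B (Python) =====
-- TT_HASHTAG_MAX    = 150
--
-- def _cap_tt_hashtags(raw_list):
--     """Single fused pass: normalize each tag and keep appending until the
--     150-char joined budget would overflow (then stop)."""
--     result = []
--     current_len = 0
--     for h in raw_list:
--         h = str(h).strip().strip('"').strip("'")
--         if not h.startswith("#"):
--             h = "#" + h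
--         h = h.replace(" ", "")
--         if len(h) <= 2:
--             continue
--         cost = len(h) + (0 if not result else 1)
--         if current_len + cost > TT_HASHTAG_MAX:
--             break
--         result.append(h)
--         current_len += cost
--     return result
-- ===== Notes on version B (the rewrite author's own statement) =====
-- stated objective: faster
-- what changed: Replaces A's three phases (build the full cleaned list, build the joined string, re-scan to trim) with one fused pass that normalizes each tag and tracks the running joined length, stopping at the first budget overflow; the intermediate cleaned list and the joined string are never built.
import Mathlib
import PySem

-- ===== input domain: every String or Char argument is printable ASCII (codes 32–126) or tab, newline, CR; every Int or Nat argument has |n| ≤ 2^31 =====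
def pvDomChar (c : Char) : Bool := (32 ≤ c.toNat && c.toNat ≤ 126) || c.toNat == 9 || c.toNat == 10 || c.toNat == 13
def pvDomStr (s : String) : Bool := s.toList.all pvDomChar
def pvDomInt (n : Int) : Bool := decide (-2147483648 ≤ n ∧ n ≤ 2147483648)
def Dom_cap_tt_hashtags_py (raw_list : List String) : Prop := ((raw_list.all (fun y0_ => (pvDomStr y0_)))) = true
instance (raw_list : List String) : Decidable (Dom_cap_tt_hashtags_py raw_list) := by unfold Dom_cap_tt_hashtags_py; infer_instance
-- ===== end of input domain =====

-- B fuses A's clean-then-join-then-retrim phases into one pass that tracks the running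
-- joined length and stops at the first overflow (measured faster; same return value everywhere).

-- ===== PORT A =====
-- shared normalization of one tag (identical lines in both Pythons)
def ttCleanTag (h : String) : String :=
  let h1 := PySem.Str.stripChars (PySem.Str.stripChars (PySem.Str.strip h) "\"") "'"
  let h2 := if PySem.Str.startswith h1 "#" then h1 else "#" ++ h1
  PySem.Str.replace h2 " " ""

-- A's first loop: build the full cleaned list
def ttCleanLoop : List String → List String → List String
  | [], cleaned => cleaned
  | h :: t, cleaned =>
    let c := ttCleanTag h
    if PySem.Str.len c > 2 then ttCleanLoop t (cleaned ++ [c]) else ttCleanLoop t cleaned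

-- A's second loop: trim the cleaned list from the end
def ttTrimLoop : List String → List String → Int → List String
  | [], result, _ => result
  | h :: t, result, currentLen =>
    let cost := PySem.Str.len h + (if result.isEmpty then 0 else 1)
    if currentLen + cost > 150 then result
    else ttTrimLoop t (result ++ [h]) (currentLen + cost)

def cap_tt_hashtags_py (raw_list : List String) : List String :=
  let cleaned := ttCleanLoop raw_list []
  let joined := PySem.Str.join " " cleaned
  if PySem.Str.len joined ≤ 150 then cleaned
  else ttTrimLoop cleaned [] 0

-- ===== PORT B =====
-- B's single fused loop: normalize, skip short tags, stop at the first budget overflow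
def ttAltLoop : List String → List String → Int → List String
  | [], result, _ => result
  | h :: t, result, currentLen =>
    let c := ttCleanTag h
    if PySem.Str.len c ≤ 2 then ttAltLoop t result currentLen
    else
      let cost := PySem.Str.len c + (if result.isEmpty then 0 else 1)
      if currentLen + cost > 150 then result
      else ttAltLoop t (result ++ [c]) (currentLen + cost)

def cap_tt_hashtags_py_alt (raw_list : List String) : List String :=
  ttAltLoop raw_list [] 0

-- ===== PRECONDITION & SPEC =====
def Spec_cap_tt_hashtags_py (raw_list : List String) (out : List String) : Prop := out = cap_tt_hashtags_py_alt raw_list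
instance (raw_list : List String) (out : List String) : Decidable (Spec_cap_tt_hashtags_py raw_list out) := by unfold Spec_cap_tt_hashtags_py; infer_instance

-- ===== CLAIM (what is proved, stated in full; the proofs are below) =====
def Claim_equal_cap_tt_hashtags_py : Prop := ∀ (raw_list : List String), Dom_cap_tt_hashtags_py raw_list → Spec_cap_tt_hashtags_py raw_list (cap_tt_hashtags_py raw_list)

-- ===== LEMMAS AND PROOFS =====

-- length of " ".join l when appended after a (non)empty prefix: empty = true means no leading space
def ttBudget : List String → Bool → Int
  | [], _ => 0
  | h :: t, e => PySem.Str.len h + (if e then 0 else 1) + ttBudget t false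

def ttBudgetC : List (List Char) → Bool → Int
  | [], _ => 0
  | h :: t, e => (h.length : Int) + (if e then 0 else 1) + ttBudgetC t false

theorem ttBudget_nonneg (l : List String) (e : Bool) : 0 ≤ ttBudget l e := by
  induction l generalizing e with
  | nil => simp [ttBudget]
  | cons h t ih =>
    have h1 : (0:Int) ≤ PySem.Str.len h := by simp
    have h2 := ih false
    simp only [ttBudget]
    split <;> omega

theorem ttCleanLoop_append (t : List String) (acc : List String) :
    ttCleanLoop t acc = acc ++ ttCleanLoop t [] := by
  induction t generalizing acc with
  | nil => simp [ttCleanLoop]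
  | cons h t ih =>
    simp only [ttCleanLoop]
    split
    · rw [ih (acc ++ [ttCleanTag h]), ih ([] ++ [ttCleanTag h])]
      simp
    · exact ih acc

theorem ttAltLoop_eq_trim (raw : List String) (res : List String) (cur : Int) :
    ttAltLoop raw res cur = ttTrimLoop (ttCleanLoop raw []) res cur := by
  induction raw generalizing res cur with
  | nil => simp [ttAltLoop, ttCleanLoop, ttTrimLoop]
  | cons h t ih =>
    simp only [ttAltLoop, ttCleanLoop]
    by_cases hle : PySem.Str.len (ttCleanTag h) ≤ 2
    · have hgt : ¬ PySem.Str.len (ttCleanTag h) > 2 := by omega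
      simp only [hle, hgt, if_true, if_false]
      exact ih res cur
    · have hgt : PySem.Str.len (ttCleanTag h) > 2 := by omega
      simp only [hle, hgt, if_true, if_false]
      rw [ttCleanLoop_append t ([] ++ [ttCleanTag h])]
      simp only [List.nil_append, List.singleton_append, ttTrimLoop]
      split
      · split
        · rfl
        · exact ih _ _
      · split
        · rfl
        · exact ih _ _

theorem ttTrimLoop_all : ∀ (l res : List String) (cur : Int),
    cur + ttBudget l res.isEmpty ≤ 150 → ttTrimLoop l res cur = res ++ l := by
  intro l
  induction l with
  | nil => intro res cur _; simp [ttTrimLoop]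
  | cons h t ih =>
    intro res cur hbud
    have hb := ttBudget_nonneg t false
    have hlen : (0:Int) ≤ PySem.Str.len h := by simp
    simp only [ttBudget] at hbud
    have hcost : ¬ (cur + (PySem.Str.len h + (if res.isEmpty then 0 else 1)) > 150) := by
      cases hc : res.isEmpty <;> simp only [hc, if_true] at hbud ⊢ <;> omega
    simp only [ttTrimLoop, if_neg hcost]
    rw [ih (res ++ [h]) (cur + (PySem.Str.len h + (if res.isEmpty then 0 else 1)))
      (by
        have hfe : (res ++ [h]).isEmpty = false := by simp
        rw [hfe]
        cases hc : res.isEmpty <;> simp only [hc, if_true] at hbud ⊢ <;> omega)]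
    simp

theorem ttJoinC_len : ∀ (l : List (List Char)),
    ((PySem.Chars.join [' '] l).length : Int) = ttBudgetC l true := by
  intro l
  induction l with
  | nil => simp [PySem.Chars.join_nil, ttBudgetC]
  | cons a t ih =>
    cases t with
    | nil => simp [PySem.Chars.join_singleton, ttBudgetC]
    | cons b t' =>
      rw [PySem.Chars.join_cons_cons]
      simp [ttBudgetC] at ih ⊢
      omega

theorem ttBudget_eq_C (l : List String) (e : Bool) :
    ttBudget l e = ttBudgetC (l.map String.toList) e := by
  induction l generalizing e with
  | nil => simp [ttBudget, ttBudgetC]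
  | cons h t ih => simp [ttBudget, ttBudgetC, PySem.Str.len_eq, ih]

theorem ttJoin_len (l : List String) :
    PySem.Str.len (PySem.Str.join " " l) = ttBudget l true := by
  have hsp : (" " : String).toList = [' '] := rfl
  rw [PySem.Str.len_eq, PySem.Str.toList_join, hsp, ttJoinC_len, ttBudget_eq_C]

-- ===== VERDICT (by name: the statement is the Claim_ definition above) =====
theorem cap_tt_hashtags_py_spec : Claim_equal_cap_tt_hashtags_py := by
  intro raw _
  unfold Spec_cap_tt_hashtags_py cap_tt_hashtags_py cap_tt_hashtags_py_alt
  rw [ttAltLoop_eq_trim]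
  show (if PySem.Str.len (PySem.Str.join " " (ttCleanLoop raw [])) ≤ 150 then ttCleanLoop raw []
        else ttTrimLoop (ttCleanLoop raw []) [] 0) = ttTrimLoop (ttCleanLoop raw []) [] 0
  split
  · next hle =>
    rw [ttTrimLoop_all (ttCleanLoop raw []) [] 0 (by
      rw [ttJoin_len] at hle
      simpa using hle)]
    simp
  · rfl
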